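-- pv_equiv track=rewrite | github.com/nobel321/aptamer-gen | sd/interpreter.py | create_indexed_list
-- ===== SOURCE A (Python) =====
-- def create_indexed_list(input_string):
--     # Split the input string by lines and strip any leading/trailing whitespaces
--     lines = [line.strip() for line in input_string.split('\n') if line.strip()]
--
--     # Create a dictionary to store the indexed values
--     indexed_values = {}
--
--     # Iterate over the lines and extract the values
--     for line in lines:
--         # Split each line by ":" to separate the index and the value
--         parts = line.split(":")
--         if len(parts) == 2:
--             index = parts[0].strip().split('.')[0]  # Extract the index from the line
--             value = parts[1].strip()
--             indexed_values[index] = value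
--
--     # Create a list where the values are assigned to the corresponding index
--     indexed_list = [indexed_values.get(str(i), None) for i in range(1, 5)]  # Use range(1, 9) to cover indices 1 to 8
--
--     return indexed_list
-- ===== SOURCE B (Python) =====
-- def create_indexed_list(input_string):
--     # No accumulator and no build pass: for each of the four slots, search the
--     # lines from the END for the last line whose key matches (last write wins).
--     lines = input_string.split('\n')
--
--     def value_for(key):
--         for raw in reversed(lines):
--             parts = raw.strip().split(':')
--             if len(parts) == 2 and parts[0].strip().split('.')[0] == key:
--                 return parts[1].strip()
--         return None
--
--     return [value_for(str(i)) for i in range(1, 5)]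
-- ===== Notes on version B (the rewrite author's own statement) =====
-- stated objective: alternative
-- what changed: Instead of one forward pass building a dict (or list) of parsed values and then looking up keys 1..4, B performs no building pass at all: for each of the four output slots it searches the lines backwards and returns the first (i.e. last-in-file) line whose key matches, which is exactly dict last-write-wins.
import Mathlib
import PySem

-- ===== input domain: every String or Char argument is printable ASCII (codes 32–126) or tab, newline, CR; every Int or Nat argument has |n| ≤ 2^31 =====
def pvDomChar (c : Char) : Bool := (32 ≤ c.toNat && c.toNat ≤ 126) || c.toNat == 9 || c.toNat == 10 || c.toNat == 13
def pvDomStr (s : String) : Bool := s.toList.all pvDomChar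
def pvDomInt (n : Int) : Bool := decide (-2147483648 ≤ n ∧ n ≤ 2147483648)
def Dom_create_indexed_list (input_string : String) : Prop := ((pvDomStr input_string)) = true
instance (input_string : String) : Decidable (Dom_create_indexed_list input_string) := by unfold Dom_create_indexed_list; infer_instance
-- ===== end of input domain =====

-- B drops A's dict-building pass entirely: each of the four slots is found by a
-- backward search for the last matching line (objective: alternative).

-- ===== PORT A =====
-- the body of A's for-loop over the (stripped, non-empty) lines
-- line.split(":") with the literal non-empty separator ":" : split? is always `some`, getD [] just unwraps
def pvAStep (d : PySem.Dict String String) (line : String) : PySem.Dict String String :=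
  let parts := (PySem.Str.split? line ":").getD []
  if parts.length = 2 then
    let index := ((PySem.Str.split? (PySem.Str.strip (parts.getD 0 "")) ".").getD []).getD 0 ""
    let value := PySem.Str.strip (parts.getD 1 "")
    d.insert index value
  else d

def create_indexed_list (input_string : String) : List (Option String) :=
  let lines := (((PySem.Str.split? input_string "\n").getD []).map PySem.Str.strip).filter (fun l => l ≠ "")
  let indexed_values := lines.foldl pvAStep PySem.Dict.empty
  (PySem.List.pyRange 1 5 1).map (fun i => indexed_values.get? (PySem.Int.toStr i))

-- ===== PORT B =====
-- does one raw line parse to key `k`? if so give its stripped value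
def pvMatch? (k : String) (raw : String) : Option String :=
  let parts := (PySem.Str.split? (PySem.Str.strip raw) ":").getD []
  if parts.length = 2 ∧ ((PySem.Str.split? (PySem.Str.strip (parts.getD 0 "")) ".").getD []).getD 0 "" = k
  then some (PySem.Str.strip (parts.getD 1 "")) else none

-- B's inner for-loop over reversed(lines): first match wins
def pvValueFor (k : String) : List String → Option String
  | [] => none
  | raw :: rest =>
    match pvMatch? k raw with
    | some v => some v
    | none => pvValueFor k rest

def create_indexed_list_alt (input_string : String) : List (Option String) :=
  let lines := (PySem.Str.split? input_string "\n").getD []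
  (PySem.List.pyRange 1 5 1).map (fun i => pvValueFor (PySem.Int.toStr i) lines.reverse)

-- ===== PRECONDITION & SPEC =====
def Spec_create_indexed_list (input_string : String) (out : List (Option String)) : Prop := out = create_indexed_list_alt input_string
instance (input_string : String) (out : List (Option String)) : Decidable (Spec_create_indexed_list input_string out) := by unfold Spec_create_indexed_list; infer_instance

-- ===== CLAIM =====
def Claim_equal_create_indexed_list : Prop := ∀ (input_string : String), Dom_create_indexed_list input_string → Spec_create_indexed_list input_string (create_indexed_list input_string)

-- ===== LEMMAS AND PROOFS =====

-- first match in xs ++ [raw]: xs first, then raw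
theorem pvValueFor_append (k : String) (xs : List String) (raw : String) :
    pvValueFor k (xs ++ [raw]) = ((pvValueFor k xs).or (pvMatch? k raw)) := by
  induction xs with
  | nil => cases h : pvMatch? k raw <;> simp [pvValueFor, h, Option.or]
  | cons x rest ih =>
    simp only [List.cons_append, pvValueFor]
    cases h : pvMatch? k x <;> simp [ih, Option.or]

-- a blank-after-strip line never matches
theorem pvMatch?_blank (k raw : String) (hs : PySem.Str.strip raw = "") :
    pvMatch? k raw = none := by
  unfold pvMatch?
  rw [hs, show (PySem.Str.split? "" ":").getD [] = [""] from by decide]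
  simp

-- one A-step on a stripped line, read at key k
theorem pvAStep_get (d : PySem.Dict String String) (raw k : String) :
    (pvAStep d (PySem.Str.strip raw)).get? k = ((pvMatch? k raw).or (d.get? k)) := by
  unfold pvAStep pvMatch?
  dsimp only
  split_ifs with h1 h2 h3
  · rw [h2.2, PySem.Dict.get?_insert_self]; rfl
  · have hne : k ≠ ((PySem.Str.split? (PySem.Str.strip
        ((((PySem.Str.split? (PySem.Str.strip raw) ":").getD []).getD 0 ""))) ".").getD []).getD 0 "" :=
      fun h => h2 ⟨h1, h.symm⟩
    rw [PySem.Dict.get?_insert_of_ne _ _ hne]; rfl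
  · exact absurd h3.1 h1
  · rfl

-- main bridge: A's fold read at k = B's backward search, falling back to d
theorem pvFold_get (raws : List String) (d : PySem.Dict String String) (k : String) :
    (((raws.map PySem.Str.strip).filter (fun l => l ≠ "")).foldl pvAStep d).get? k
      = ((pvValueFor k raws.reverse).or (d.get? k)) := by
  induction raws generalizing d with
  | nil => simp [pvValueFor, Option.or]
  | cons raw rest ih =>
    simp only [List.map_cons, List.filter_cons, List.reverse_cons]
    rw [pvValueFor_append]
    by_cases hs : PySem.Str.strip raw = ""
    · rw [show (decide (PySem.Str.strip raw ≠ "")) = false from by simp [hs]]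
      simp only [Bool.false_eq_true, if_false]
      rw [ih d, pvMatch?_blank k raw hs]
      cases pvValueFor k rest.reverse <;> simp [Option.or]
    · rw [show (decide (PySem.Str.strip raw ≠ "")) = true from by simp [hs]]
      simp only [if_true, List.foldl_cons]
      rw [ih (pvAStep d (PySem.Str.strip raw)), pvAStep_get d raw k]
      cases pvValueFor k rest.reverse <;> cases pvMatch? k raw <;> simp [Option.or]

-- ===== VERDICT =====
theorem create_indexed_list_spec : Claim_equal_create_indexed_list := by
  intro s _
  unfold Spec_create_indexed_list create_indexed_list create_indexed_list_alt
  rw [show PySem.List.pyRange 1 5 1 = [1, 2, 3, 4] from by decide]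
  simp only [List.map_cons, List.map_nil]
  rw [pvFold_get, pvFold_get, pvFold_get, pvFold_get]
  simp [PySem.Dict.empty, PySem.Dict.get?, Option.or_none]
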